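-- pv_equiv track=rewrite | github.com/Appsmine-karthi/FMB-refixingV2 | pydep/func.py | arrange_chain
-- ===== SOURCE A (Python) =====
-- def arrange_chain(arr):
--     chain = [arr[0]]
--     remaining = arr[1:]
--
--     for _ in range(len(arr) - 1):
--         end = chain[-1][1]
--         found = False
--         for i, e in enumerate(remaining):
--             if e[0] == end:
--                 chain.append(e)
--                 remaining.pop(i)
--                 found = True
--                 break
--             elif e[1] == end:
--                 chain.append([e[1], e[0]])  # reverse the direction
--                 remaining.pop(i)
--                 found = True
--                 break
--         if not found:
--             break
--
--     chn_car = [i[0] for i in chain]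
--     return chn_car
-- ===== SOURCE B (Python) =====
-- def arrange_chain(arr):
--     # Build once: value -> indices where it occurs as head / as tail, stored in
--     # DECREASING index order so that .pop() always yields the smallest index.
--     heads = {}
--     tails = {}
--     for i in range(len(arr) - 1, 0, -1):
--         heads.setdefault(arr[i][0], []).append(i)
--         tails.setdefault(arr[i][1], []).append(i)
--     used = [False] * len(arr)
--     out = [arr[0][0]]
--     end = arr[0][1]
--     for _ in range(len(arr) - 1):
--         hl = heads.get(end, ())
--         while hl and used[hl[-1]]:
--             hl.pop()
--         tl = tails.get(end, ())
--         while tl and used[tl[-1]]: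
--             tl.pop()
--         if hl and (not tl or hl[-1] <= tl[-1]):
--             i = hl.pop()
--             used[i] = True
--             out.append(end)
--             end = arr[i][1]
--         elif tl:
--             i = tl.pop()
--             used[i] = True
--             out.append(end)
--             end = arr[i][0]
--         else:
--             break
--     return out
-- ===== Notes on version B (the rewrite author's own statement) =====
-- stated objective: alternative
-- what changed: B indexes each value to the (decreasingly ordered) lists of positions where it occurs as head/tail once up front and then, with a used[] array and lazy deletion, picks the smallest matching remaining index per step, replacing A's per-step linear rescans of a shrinking remaining list with pop.
-- outside the precondition, e.g. on arrange_chain([[1, 2], [2]]): A returns [1, 2], B raises IndexError; on arrange_chain([[5]]): A returns [5], B raises IndexError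
import Mathlib
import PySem

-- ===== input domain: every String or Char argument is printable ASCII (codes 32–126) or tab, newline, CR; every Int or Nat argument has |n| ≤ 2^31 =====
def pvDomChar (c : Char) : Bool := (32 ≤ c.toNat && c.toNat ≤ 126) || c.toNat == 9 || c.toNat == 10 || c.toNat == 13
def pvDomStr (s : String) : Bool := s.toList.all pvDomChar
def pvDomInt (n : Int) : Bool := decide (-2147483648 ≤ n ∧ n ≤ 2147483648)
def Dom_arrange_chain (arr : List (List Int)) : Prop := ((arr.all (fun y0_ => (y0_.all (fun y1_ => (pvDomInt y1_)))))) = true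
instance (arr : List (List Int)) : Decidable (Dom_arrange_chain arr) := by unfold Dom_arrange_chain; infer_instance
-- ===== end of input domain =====

-- B replaces A's per-step rescans of the shrinking remaining list by value->indices
-- dictionaries built once and consumed lazily with a used[] array (objective: alternative).


-- e[0] and e[1] (exact: under Pre_ every element has length ≥ 2)
def pvE0 (e : List Int) : Int := PySem.List.pyGetD e 0 0
def pvE1 (e : List Int) : Int := PySem.List.pyGetD e 1 0

-- ===== PORT A =====
-- the inner `for i, e in enumerate(remaining)` scan with its two-branch match and break:
-- returns (position, element, matched-on-e[0]?) of the first match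
def pvFind (endv : Int) : List (List Int) → Option (Nat × List Int × Bool)
  | [] => none
  | e :: rest =>
    if pvE0 e = endv then some (0, e, true)
    else if pvE1 e = endv then some (0, e, false)
    else (pvFind endv rest).map (fun r => (r.1 + 1, r.2))

-- the outer `for _ in range(len(arr)-1)` loop over (chain, remaining);
-- `remaining.pop(i)` is eraseIdx i (i is in range by construction)
def pvALoop : Nat → List (List Int) → List (List Int) → List (List Int)
  | 0, chain, _ => chain
  | k+1, chain, remaining =>
    let endv := pvE1 (PySem.List.pyGetD chain (-1) [])      -- chain[-1][1]
    match pvFind endv remaining with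
    | some (_i, e, true)  => pvALoop k (chain ++ [e]) (remaining.eraseIdx _i)
    | some (_i, e, false) => pvALoop k (chain ++ [[pvE1 e, pvE0 e]]) (remaining.eraseIdx _i)
    | none => chain

def arrange_chain (arr : List (List Int)) : List Int :=
  (pvALoop (arr.length - 1) [PySem.List.pyGetD arr 0 []] (PySem.List.slice arr (some 1) none)).map pvE0

-- ===== PORT B =====
-- `heads.setdefault(arr[i][0], []).append(i)` / same for tails, over range(len(arr)-1, 0, -1)
def pvBuild (arr : List (List Int)) : PySem.Dict Int (List Int) × PySem.Dict Int (List Int) :=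
  (PySem.List.pyRange ((arr.length : Int) - 1) 0 (-1)).foldl
    (fun ht i =>
      (ht.1.modify (pvE0 (PySem.List.pyGetD arr i [])) [] (· ++ [i]),
       ht.2.modify (pvE1 (PySem.List.pyGetD arr i [])) [] (· ++ [i])))
    (PySem.Dict.empty, PySem.Dict.empty)

-- `while lst and used[lst[-1]]: lst.pop()` (indices are nonneg and in range)
def pvPrune (used : List Bool) (l : List Int) : List Int :=
  if h : l = [] then l
  else if PySem.List.pyGetD used (l.getLast h) false then pvPrune used l.dropLast else l
termination_by l.length
decreasing_by
  have : l.length ≠ 0 := fun h0 => h (List.length_eq_zero_iff.mp h0)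
  simp [List.length_dropLast]; omega

-- the main `for _ in range(len(arr)-1)` loop; the insert-backs mirror the in-place
-- mutation of the lists held by the dicts (`hl`/`tl` alias `heads[end]`/`tails[end]`)
def pvBLoop (arr : List (List Int)) :
    Nat → List Int → Int → List Bool → PySem.Dict Int (List Int) → PySem.Dict Int (List Int) → List Int
  | 0, out, _, _, _, _ => out
  | k+1, out, endv, used, heads, tails =>
    let hl := pvPrune used (heads.getD endv [])
    let tl := pvPrune used (tails.getD endv [])
    match hl.getLast?, tl.getLast? with
    | none, none => out
    | some i, none =>
        pvBLoop arr k (out ++ [endv]) (pvE1 (PySem.List.pyGetD arr i []))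
          (PySem.List.pySetD used i true) (heads.insert endv hl.dropLast) (tails.insert endv tl)
    | some i, some j =>
        if i ≤ j then
          pvBLoop arr k (out ++ [endv]) (pvE1 (PySem.List.pyGetD arr i []))
            (PySem.List.pySetD used i true) (heads.insert endv hl.dropLast) (tails.insert endv tl)
        else
          pvBLoop arr k (out ++ [endv]) (pvE0 (PySem.List.pyGetD arr j []))
            (PySem.List.pySetD used j true) (heads.insert endv hl) (tails.insert endv tl.dropLast)
    | none, some j =>
        pvBLoop arr k (out ++ [endv]) (pvE0 (PySem.List.pyGetD arr j []))
          (PySem.List.pySetD used j true) (heads.insert endv hl) (tails.insert endv tl.dropLast)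

def arrange_chain_alt (arr : List (List Int)) : List Int :=
  let ht := pvBuild arr
  pvBLoop arr (arr.length - 1) [pvE0 (PySem.List.pyGetD arr 0 [])] (pvE1 (PySem.List.pyGetD arr 0 []))
    (List.replicate arr.length false) ht.1 ht.2

-- ===== PRECONDITION & SPEC =====
-- Pre_ restricts to the natural edge-pair domain: a nonempty list of inner lists of length ≥ 2.
-- Python A raises IndexError on the empty list and on most inputs with a short inner list; on a few such
-- inputs A still returns (see cites) but B raises there, so they are excluded.
def Pre_arrange_chain (arr : List (List Int)) : Prop := arr ≠ [] ∧ ∀ e ∈ arr, 2 ≤ e.length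
instance (arr : List (List Int)) : Decidable (Pre_arrange_chain arr) := by unfold Pre_arrange_chain; infer_instance
def pvWitness_arrange_chain : List (List Int) := [[1, 2], [2, 3]]

def Spec_arrange_chain (arr : List (List Int)) (out : List Int) : Prop := out = arrange_chain_alt arr
instance (arr : List (List Int)) (out : List Int) : Decidable (Spec_arrange_chain arr out) := by unfold Spec_arrange_chain; infer_instance

-- ===== CLAIM (what is proved, stated in full; the proofs are below) =====
def Claim_equal_arrange_chain : Prop := ∀ (arr : List (List Int)), Dom_arrange_chain arr → Pre_arrange_chain arr → Spec_arrange_chain arr (arrange_chain arr)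

-- ===== LEMMAS AND PROOFS =====

-- abstract view shared by the proofs
def pvKeyH (arr : List (List Int)) (i : Int) : Int := pvE0 (PySem.List.pyGetD arr i [])
def pvKeyT (arr : List (List Int)) (i : Int) : Int := pvE1 (PySem.List.pyGetD arr i [])
def pvUnused (used : List Bool) (i : Int) : Bool := !(PySem.List.pyGetD used i false)
def pvLive (arr : List (List Int)) (used : List Bool) : List Int :=
  (PySem.List.pyRange 1 (arr.length : Int) 1).filter (pvUnused used)
def pvMatch (arr : List (List Int)) (endv i : Int) : Bool :=
  (pvKeyH arr i == endv) || (pvKeyT arr i == endv)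

-- the index-level version of A's inner scan
def pvFindIdx (arr : List (List Int)) (endv : Int) : List Int → Option (Nat × Int)
  | [] => none
  | i :: L => if pvMatch arr endv i then some (0, i) else (pvFindIdx arr endv L).map (fun r => (r.1 + 1, r.2))

-- the invariant tying a per-value index list to the used[] array
def pvGoodL (arr : List (List Int)) (used : List Bool) (key : List (List Int) → Int → Int)
    (v : Int) (l : List Int) : Prop :=
  l.Pairwise (· > ·) ∧
  (∀ i ∈ l, 1 ≤ i ∧ i < (arr.length : Int) ∧ key arr i = v) ∧
  (∀ i : Int, 1 ≤ i → i < (arr.length : Int) → pvUnused used i = true → key arr i = v → i ∈ l)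

-- the full relational invariant between A's state and B's state
structure pvRel (arr : List (List Int)) (chain remaining : List (List Int))
    (out : List Int) (endv : Int) (used : List Bool)
    (heads tails : PySem.Dict Int (List Int)) : Prop where
  hout : out = chain.map pvE0
  hend : endv = pvE1 (PySem.List.pyGetD chain (-1) [])
  hlen : used.length = arr.length
  hrem : remaining = (pvLive arr used).map (fun i => PySem.List.pyGetD arr i [])
  hheads : ∀ v, pvGoodL arr used pvKeyH v (heads.getD v [])
  htails : ∀ v, pvGoodL arr used pvKeyT v (tails.getD v [])

lemma pvFind_map (arr : List (List Int)) (endv : Int) (L : List Int) :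
    pvFind endv (L.map (fun i => PySem.List.pyGetD arr i [])) =
      (pvFindIdx arr endv L).map
        (fun r => (r.1, PySem.List.pyGetD arr r.2 [], pvKeyH arr r.2 == endv)) := by
  induction L with
  | nil => rfl
  | cons i L ih =>
    by_cases h0 : pvE0 (PySem.List.pyGetD arr i []) = endv
    · simp [pvFind, pvFindIdx, pvMatch, pvKeyH, h0]
    · by_cases h1 : pvE1 (PySem.List.pyGetD arr i []) = endv
      · simp [pvFind, pvFindIdx, pvMatch, pvKeyH, pvKeyT, h0, h1]
      · simp only [List.map_cons, pvFind, pvFindIdx, pvMatch, pvKeyH, pvKeyT, h0, h1,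
          if_false, beq_iff_eq, Bool.or_eq_true, or_self, ih]
        cases pvFindIdx arr endv L <;> simp

lemma pvFindIdx_none_iff (arr : List (List Int)) (endv : Int) (L : List Int) :
    pvFindIdx arr endv L = none ↔ ∀ i ∈ L, pvMatch arr endv i = false := by
  induction L with
  | nil => simp [pvFindIdx]
  | cons i L ih =>
    by_cases h : pvMatch arr endv i = true
    · simp [pvFindIdx, h]
    · simp only [Bool.not_eq_true] at h
      simp [pvFindIdx, h, ih]

lemma pvFindIdx_some (arr : List (List Int)) (endv : Int) (L : List Int) (p : Nat) (i : Int)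
    (h : pvFindIdx arr endv L = some (p, i)) :
    ∃ L1 L2, L = L1 ++ i :: L2 ∧ L1.length = p ∧
      (∀ j ∈ L1, pvMatch arr endv j = false) ∧ pvMatch arr endv i = true := by
  induction L generalizing p with
  | nil => simp [pvFindIdx] at h
  | cons a L ih =>
    by_cases ha : pvMatch arr endv a = true
    · simp [pvFindIdx, ha] at h
      exact ⟨[], L, by simp [h.2], by simp [← h.1], by simp, h.2 ▸ ha⟩
    · simp only [Bool.not_eq_true] at ha
      simp only [pvFindIdx, ha, Bool.false_eq_true, if_false, Option.map_eq_some_iff] at h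
      obtain ⟨⟨q, i'⟩, hq, he⟩ := h
      simp only [Prod.mk.injEq] at he
      obtain ⟨L1, L2, hdc, hlen, hmiss, hmatch⟩ := ih q (he.2 ▸ hq)
      exact ⟨a :: L1, L2, by simp [hdc], by simp [hlen, ← he.1], by
        intro j hj
        rcases List.mem_cons.mp hj with h | h
        · exact h ▸ ha
        · exact hmiss j h, hmatch⟩

lemma mem_pvLive (arr : List (List Int)) (used : List Bool) (i : Int) :
    i ∈ pvLive arr used ↔ 1 ≤ i ∧ i < (arr.length : Int) ∧ pvUnused used i = true := by
  simp [pvLive, List.mem_filter, PySem.List.mem_pyRange_one, and_assoc]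

lemma pvLive_pairwise (arr : List (List Int)) (used : List Bool) :
    (pvLive arr used).Pairwise (· < ·) := by
  exact List.Pairwise.filter _ (PySem.List.pairwise_lt_pyRange_one 1 (arr.length : Int))

lemma pvUnused_set (used : List Bool) (i j : Int) (hi : 0 ≤ i) (hilt : i < (used.length : Int))
    (hj : 0 ≤ j) (hjlt : j < (used.length : Int)) :
    pvUnused (PySem.List.pySetD used i true) j = if j = i then false else pvUnused used j := by
  have hset : PySem.List.pySetD used i true = used.set i.toNat true :=
    PySem.List.pySetD_of_nonneg used true hi
  have hjl : j.toNat < used.length := by omega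
  have hjl' : j.toNat < (used.set i.toNat true).length := by simpa using hjl
  rw [pvUnused, pvUnused, hset,
    PySem.List.pyGetD_eq_getElem (used.set i.toNat true) false hj (by simpa using hjlt),
    PySem.List.pyGetD_eq_getElem used false hj hjlt]
  rw [List.getElem_set]
  by_cases hij : j = i
  · simp [hij]
  · have : i.toNat ≠ j.toNat := by omega
    simp [this, hij]

lemma filter_toggle_erase {α : Type} [DecidableEq α] (q q' : α → Bool) (x : α) (L : List α)
    (hnd : L.Nodup) (hq' : ∀ j ∈ L, j ≠ x → q' j = q j) (hx : q' x = false) (hqx : q x = true) :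
    L.filter q' = (L.filter q).erase x := by
  induction L with
  | nil => rfl
  | cons a L ih =>
    have hnd' := (List.nodup_cons.mp hnd).2
    have hax := (List.nodup_cons.mp hnd).1
    by_cases hx' : a = x
    · subst hx'
      rw [List.filter_cons_of_neg (by simp [hx]), List.filter_cons_of_pos hqx,
        List.erase_cons_head]
      exact List.filter_congr (fun j hj => hq' j (List.mem_cons_of_mem _ hj)
        (fun he => hax (he ▸ hj)))
    · have hqa : q' a = q a := hq' a (List.mem_cons_self) hx'
      have ih' := ih hnd' (fun j hj hjx => hq' j (List.mem_cons_of_mem _ hj) hjx)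
      by_cases hqa' : q a = true
      · rw [List.filter_cons_of_pos (hqa ▸ hqa'), List.filter_cons_of_pos hqa',
          List.erase_cons_tail (by simp [hx']), ih']
      · rw [List.filter_cons_of_neg (by simp [hqa, hqa']),
          List.filter_cons_of_neg (by simp [hqa']), ih']

lemma pvLive_set (arr : List (List Int)) (used : List Bool) (i : Int)
    (hlen : used.length = arr.length)
    (h1 : 1 ≤ i) (h2 : i < (arr.length : Int)) (hu : pvUnused used i = true) :
    pvLive arr (PySem.List.pySetD used i true) = (pvLive arr used).erase i := by
  unfold pvLive
  apply filter_toggle_erase _ _ i _ (PySem.List.nodup_pyRange_one 1 _)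
  · intro j hj hji
    have hb := (PySem.List.mem_pyRange_one).mp hj
    rw [pvUnused_set used i j (by omega) (by omega) (by omega) (by omega)]
    simp [hji]
  · rw [pvUnused_set used i i (by omega) (by omega) (by omega) (by omega)]
    simp
  · exact hu

-- prune returns a prefix
lemma pvPrune_prefix (used : List Bool) (l : List Int) : (pvPrune used l) <+: l := by
  fun_induction pvPrune used l with
  | case1 => exact List.prefix_refl _
  | case2 l h hu ih => exact ih.trans (List.dropLast_prefix l)
  | case3 => exact List.prefix_refl _

lemma pairwise_gt_getLast_le (l : List Int) (h : l.Pairwise (· > ·)) (hne : l ≠ []) :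
    ∀ j ∈ l, l.getLast hne ≤ j := by
  induction l with
  | nil => cases hne rfl
  | cons a t ih =>
    intro j hj
    rcases List.mem_cons.mp hj with rfl | hjt
    · by_cases ht : t = []
      · subst ht; simp
      · rw [List.getLast_cons ht]
        exact le_of_lt ((List.pairwise_cons.mp h).1 _ (List.getLast_mem ht))
    · have ht : t ≠ [] := fun he => by subst he; cases hjt
      rw [List.getLast_cons ht]
      exact ih (List.pairwise_cons.mp h).2 ht j hjt

lemma pvPrune_keeps_unused (used : List Bool) (l : List Int) :
    ∀ j, j ∈ l → pvUnused used j = true → j ∈ pvPrune used l := by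
  fun_induction pvPrune used l with
  | case1 => intro j hj _; cases hj
  | case2 l hne hcond ih =>
    intro j hj hu
    apply ih
    · have hne' : j ≠ l.getLast hne := by
        intro he
        simp [pvUnused, he, hcond] at hu
      rw [← List.dropLast_append_getLast hne] at hj
      rcases List.mem_append.mp hj with h' | h'
      · exact h'
      · simp only [List.mem_singleton] at h'; exact absurd h' hne'
    · exact hu
  | case3 => intro j hj _; exact hj

lemma pvPrune_cases (used : List Bool) (l : List Int) (hs : l.Pairwise (· > ·)) :
    (pvPrune used l = [] ∧ ∀ j ∈ l, pvUnused used j = false) ∨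
    (∃ m, (pvPrune used l).getLast? = some m ∧ pvUnused used m = true ∧ m ∈ l ∧
      ∀ j ∈ l, pvUnused used j = true → m ≤ j) := by
  fun_induction pvPrune used l with
  | case1 => exact Or.inl ⟨rfl, by intro j hj; cases hj⟩
  | case2 l hne hcond ih =>
    have hdrop : l.dropLast ++ [l.getLast hne] = l := List.dropLast_append_getLast hne
    have hlastused : pvUnused used (l.getLast hne) = false := by
      simp [pvUnused, hcond]
    rcases ih (hs.sublist (List.dropLast_sublist _)) with ⟨he, hall⟩ | ⟨m, hm, hu, hmem, hmin⟩
    · refine Or.inl ⟨he, ?_⟩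
      intro j hj
      rw [← hdrop] at hj
      rcases List.mem_append.mp hj with h' | h'
      · exact hall j h'
      · simp only [List.mem_singleton] at h'; exact h' ▸ hlastused
    · refine Or.inr ⟨m, hm, hu, ?_, ?_⟩
      · rw [← hdrop]; exact List.mem_append_left _ hmem
      · intro j hj hju
        rw [← hdrop] at hj
        rcases List.mem_append.mp hj with h' | h'
        · exact hmin j h' hju
        · simp only [List.mem_singleton] at h'
          rw [h'] at hju; rw [hlastused] at hju; cases hju
  | case3 l hne hcond =>
    refine Or.inr ⟨l.getLast hne, ?_, ?_, List.getLast_mem hne, ?_⟩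
    · exact (List.getLast?_eq_some_getLast hne).symm ▸ rfl
    · simp only [pvUnused]
      simpa using hcond
    · intro j hj _; exact pairwise_gt_getLast_le l hs hne j hj


lemma pvBuild_getD (arr : List (List Int)) (v : Int) :
    (pvBuild arr).1.getD v [] =
      (PySem.List.pyRange ((arr.length : Int) - 1) 0 (-1)).filter (fun i => pvKeyH arr i == v) ∧
    (pvBuild arr).2.getD v [] =
      (PySem.List.pyRange ((arr.length : Int) - 1) 0 (-1)).filter (fun i => pvKeyT arr i == v) := by
  unfold pvBuild
  rw [PySem.List.foldl_prod_mk
    (fun (d : PySem.Dict Int (List Int)) (i : Int) => d.modify (pvE0 (PySem.List.pyGetD arr i [])) [] (· ++ [i]))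
    (fun (d : PySem.Dict Int (List Int)) (i : Int) => d.modify (pvE1 (PySem.List.pyGetD arr i [])) [] (· ++ [i]))]
  constructor
  · rw [show (fun (d : PySem.Dict Int (List Int)) (i : Int) =>
        d.modify (pvE0 (PySem.List.pyGetD arr i [])) [] (· ++ [i])) =
        (fun d i => d.modify (pvKeyH arr i) [] (· ++ [i])) from rfl]
    rw [show (List.foldl (fun (d : PySem.Dict Int (List Int)) i => d.modify (pvKeyH arr i) [] (· ++ [i]))
          PySem.Dict.empty (PySem.List.pyRange ((arr.length : Int) - 1) 0 (-1))) =
        (List.foldl (fun (d : PySem.Dict Int (List Int)) (p : Int × Int) => d.modify p.1 [] (· ++ [p.2]))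
          PySem.Dict.empty
          ((PySem.List.pyRange ((arr.length : Int) - 1) 0 (-1)).map (fun i => (pvKeyH arr i, i)))) from
        (List.foldl_map (f := fun i => (pvKeyH arr i, i))
          (g := fun (d : PySem.Dict Int (List Int)) (p : Int × Int) => d.modify p.1 [] (· ++ [p.2]))).symm]
    rw [PySem.Dict.getD_foldl_modify_append]
    rw [List.filter_map]
    simp [List.map_map, Function.comp_def]
  · rw [show (fun (d : PySem.Dict Int (List Int)) (i : Int) =>
        d.modify (pvE1 (PySem.List.pyGetD arr i [])) [] (· ++ [i])) =
        (fun d i => d.modify (pvKeyT arr i) [] (· ++ [i])) from rfl]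
    rw [show (List.foldl (fun (d : PySem.Dict Int (List Int)) i => d.modify (pvKeyT arr i) [] (· ++ [i]))
          PySem.Dict.empty (PySem.List.pyRange ((arr.length : Int) - 1) 0 (-1))) =
        (List.foldl (fun (d : PySem.Dict Int (List Int)) (p : Int × Int) => d.modify p.1 [] (· ++ [p.2]))
          PySem.Dict.empty
          ((PySem.List.pyRange ((arr.length : Int) - 1) 0 (-1)).map (fun i => (pvKeyT arr i, i)))) from
        (List.foldl_map (f := fun i => (pvKeyT arr i, i))
          (g := fun (d : PySem.Dict Int (List Int)) (p : Int × Int) => d.modify p.1 [] (· ++ [p.2]))).symm]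
    rw [PySem.Dict.getD_foldl_modify_append]
    rw [List.filter_map]
    simp [List.map_map, Function.comp_def]

lemma goodL_of_filter_range (arr : List (List Int)) (used : List Bool)
    (key : List (List Int) → Int → Int) (v : Int) :
    pvGoodL arr used key v
      ((PySem.List.pyRange ((arr.length : Int) - 1) 0 (-1)).filter (fun i => key arr i == v)) := by
  refine ⟨?_, ?_, ?_⟩
  · apply List.Pairwise.filter
    rw [PySem.List.pyRange_neg_one_eq_reverse]
    exact List.pairwise_reverse.mpr ((PySem.List.pairwise_lt_pyRange_one 1 ((arr.length : Int) - 1 + 1)).imp (fun h => h))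
  · intro i hi
    obtain ⟨hr, hk⟩ := List.mem_filter.mp hi
    obtain ⟨h1, h2⟩ := PySem.List.mem_pyRange_neg_one.mp hr
    exact ⟨by omega, by omega, by simpa using hk⟩
  · intro i h1 h2 _ hk
    exact List.mem_filter.mpr ⟨PySem.List.mem_pyRange_neg_one.mpr ⟨by omega, by omega⟩, by simpa using hk⟩

lemma goodL_prune (arr : List (List Int)) (used : List Bool)
    (key : List (List Int) → Int → Int) (v : Int) (l : List Int)
    (hg : pvGoodL arr used key v l) : pvGoodL arr used key v (pvPrune used l) :=
  ⟨hg.1.sublist (pvPrune_prefix used l).sublist,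
   fun i hi => hg.2.1 i ((pvPrune_prefix used l).subset hi),
   fun i h1 h2 h3 h4 => pvPrune_keeps_unused used l i (hg.2.2 i h1 h2 h3 h4) h3⟩

lemma goodL_mark (arr : List (List Int)) (used : List Bool)
    (key : List (List Int) → Int → Int) (v : Int) (l : List Int) (i : Int)
    (hlen : used.length = arr.length) (h1 : 1 ≤ i) (h2 : i < (arr.length : Int))
    (hg : pvGoodL arr used key v l) :
    pvGoodL arr (PySem.List.pySetD used i true) key v l := by
  refine ⟨hg.1, hg.2.1, ?_⟩
  intro j hj1 hj2 hju hk
  apply hg.2.2 j hj1 hj2 ?_ hk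
  rw [pvUnused_set used i j (by omega) (by omega) (by omega) (by omega)] at hju
  by_cases hij : j = i
  · rw [if_pos hij] at hju; cases hju
  · rwa [if_neg hij] at hju

lemma goodL_step_taken (arr : List (List Int)) (used : List Bool)
    (key : List (List Int) → Int → Int) (v : Int) (l : List Int) (i : Int)
    (hlen : used.length = arr.length) (h1 : 1 ≤ i) (h2 : i < (arr.length : Int))
    (hg : pvGoodL arr used key v l)
    (hlast : (pvPrune used l).getLast? = some i) :
    pvGoodL arr (PySem.List.pySetD used i true) key v ((pvPrune used l).dropLast) := by
  have hg' := goodL_mark arr used key v (pvPrune used l) i hlen h1 h2 (goodL_prune arr used key v l hg)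
  refine ⟨hg'.1.sublist (List.dropLast_sublist _), fun j hj => hg'.2.1 j ((List.dropLast_sublist _).subset hj), ?_⟩
  intro j hj1 hj2 hju hk
  have hjl : j ∈ pvPrune used l := hg'.2.2 j hj1 hj2 hju hk
  have hne : pvPrune used l ≠ [] := by intro he; rw [he] at hlast; cases hlast
  have hgl : (pvPrune used l).getLast hne = i := by
    have := List.getLast?_eq_some_getLast hne
    rw [hlast] at this; exact (Option.some.inj this).symm
  have hji : j ≠ i := by
    intro he
    rw [pvUnused_set used i j (by omega) (by omega) (by omega) (by omega), if_pos he] at hju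
    cases hju
  rw [← List.dropLast_append_getLast hne, hgl] at hjl
  rcases List.mem_append.mp hjl with h' | h'
  · exact h'
  · simp only [List.mem_singleton] at h'; exact absurd h' hji

lemma min_of_decomp (arr : List (List Int)) (endv : Int) (L L1 L2 : List Int) (i : Int)
    (hpw : L.Pairwise (· < ·)) (hdc : L = L1 ++ i :: L2)
    (hL1 : ∀ j ∈ L1, pvMatch arr endv j = false) :
    ∀ j ∈ L, pvMatch arr endv j = true → i ≤ j := by
  intro j hj hm
  rw [hdc] at hj hpw
  rcases List.mem_append.mp hj with h | h
  · rw [hL1 j h] at hm; cases hm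
  · rcases List.mem_cons.mp h with rfl | h2
    · exact le_refl _
    · exact le_of_lt ((List.pairwise_cons.mp (List.pairwise_append.mp hpw).2.1).1 j h2)

lemma prune_getLast_pick (arr : List (List Int)) (endv : Int) (used : List Bool)
    (key : List (List Int) → Int → Int) (l : List Int) (i : Int)
    (hg : pvGoodL arr used key endv l)
    (hmem : i ∈ pvLive arr used) (hkey : key arr i = endv)
    (hmin : ∀ j ∈ pvLive arr used, pvMatch arr endv j = true → i ≤ j)
    (hmono : ∀ j, key arr j = endv → pvMatch arr endv j = true) :
    (pvPrune used l).getLast? = some i := by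
  obtain ⟨hb1, hb2, hbu⟩ := (mem_pvLive arr used i).mp hmem
  have hil : i ∈ l := hg.2.2 i hb1 hb2 hbu hkey
  rcases pvPrune_cases used l hg.1 with ⟨_, hall⟩ | ⟨m, hm, hmu, hmmem, hmmin⟩
  · rw [hall i hil] at hbu; cases hbu
  · have hle : m ≤ i := hmmin i hil hbu
    obtain ⟨hs1, hs2, hs3⟩ := hg.2.1 m hmmem
    have hmlive : m ∈ pvLive arr used := (mem_pvLive arr used m).mpr ⟨hs1, hs2, hmu⟩
    have hge : i ≤ m := hmin m hmlive (hmono m hs3)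
    rw [hm]
    congr 1
    omega

lemma prune_getLast_other (arr : List (List Int)) (endv : Int) (used : List Bool)
    (key : List (List Int) → Int → Int) (l : List Int) (m i : Int)
    (hg : pvGoodL arr used key endv l)
    (hm : (pvPrune used l).getLast? = some m)
    (hmin : ∀ j ∈ pvLive arr used, pvMatch arr endv j = true → i ≤ j)
    (hmono : ∀ j, key arr j = endv → pvMatch arr endv j = true) :
    i ≤ m ∧ key arr m = endv := by
  rcases pvPrune_cases used l hg.1 with ⟨he, _⟩ | ⟨m', hm', hmu, hmmem, _⟩
  · rw [he] at hm; cases hm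
  · rw [hm'] at hm
    have heq : m' = m := Option.some.inj hm
    obtain ⟨hs1, hs2, hs3⟩ := hg.2.1 m' hmmem
    have hmlive : m' ∈ pvLive arr used := (mem_pvLive arr used m').mpr ⟨hs1, hs2, hmu⟩
    exact heq ▸ ⟨hmin m' hmlive (hmono m' hs3), hs3⟩

lemma eraseIdx_decomp {α : Type} (L1 L2 : List α) (x : α) :
    (L1 ++ x :: L2).eraseIdx L1.length = L1 ++ L2 := by
  induction L1 with
  | nil => rfl
  | cons a L ih => simpa [List.eraseIdx] using ih

-- the synchronized-loop lemma
lemma pvLoop_eq (arr : List (List Int)) (k : Nat) :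
    ∀ chain remaining out endv used heads tails,
      pvRel arr chain remaining out endv used heads tails →
      (pvALoop k chain remaining).map pvE0 = pvBLoop arr k out endv used heads tails := by
  induction k with
  | zero =>
    intro chain remaining out endv used heads tails hrel
    simpa [pvALoop, pvBLoop] using hrel.hout.symm
  | succ k ih =>
    intro chain remaining out endv used heads tails hrel
    obtain ⟨hout, hend, hlen, hrem, hheads, htails⟩ := hrel
    have hpwL : (pvLive arr used).Pairwise (· < ·) := pvLive_pairwise arr used
    have hmonoH : ∀ j, pvKeyH arr j = endv → pvMatch arr endv j = true := by
      intro j hj; simp [pvMatch, hj]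
    have hmonoT : ∀ j, pvKeyT arr j = endv → pvMatch arr endv j = true := by
      intro j hj; simp [pvMatch, hj]
    rw [pvALoop, pvBLoop, ← hend, hrem, pvFind_map arr endv]
    cases hF : pvFindIdx arr endv (pvLive arr used) with
    | none =>
      have hnone := (pvFindIdx_none_iff arr endv _).mp hF
      have hhl : (pvPrune used (heads.getD endv [])).getLast? = none := by
        rcases pvPrune_cases used _ (hheads endv).1 with ⟨he, _⟩ | ⟨m, hm, hmu, hmm, _⟩
        · rw [he]; rfl
        · obtain ⟨h1, h2, h3⟩ := (hheads endv).2.1 m hmm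
          have hml : m ∈ pvLive arr used := (mem_pvLive arr used m).mpr ⟨h1, h2, hmu⟩
          have := hmonoH m h3
          rw [hnone m hml] at this; cases this
      have htl : (pvPrune used (tails.getD endv [])).getLast? = none := by
        rcases pvPrune_cases used _ (htails endv).1 with ⟨he, _⟩ | ⟨m, hm, hmu, hmm, _⟩
        · rw [he]; rfl
        · obtain ⟨h1, h2, h3⟩ := (htails endv).2.1 m hmm
          have hml : m ∈ pvLive arr used := (mem_pvLive arr used m).mpr ⟨h1, h2, hmu⟩
          have := hmonoT m h3
          rw [hnone m hml] at this; cases this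
      simp only [Option.map_none, hhl, htl]
      exact hout.symm
    | some r =>
      obtain ⟨p, i⟩ := r
      obtain ⟨L1, L2, hdc, hlenp, hmiss, hmatch⟩ := pvFindIdx_some arr endv _ p i hF
      have hiL : i ∈ pvLive arr used := by rw [hdc]; simp
      obtain ⟨hb1, hb2, hbu⟩ := (mem_pvLive arr used i).mp hiL
      have hmin := min_of_decomp arr endv _ L1 L2 i hpwL hdc hmiss
      have hiL1 : i ∉ L1 := fun hmem => by rw [hmiss i hmem] at hmatch; cases hmatch
      -- the new live list after marking i
      have hlive' : pvLive arr (PySem.List.pySetD used i true) = L1 ++ L2 := by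
        rw [pvLive_set arr used i hlen hb1 hb2 hbu, hdc,
          List.erase_append_right _ hiL1, List.erase_cons_head]
      -- the new remaining list after pop(p)
      have hrem' : ((pvLive arr used).map (fun j => PySem.List.pyGetD arr j [])).eraseIdx p =
          (pvLive arr (PySem.List.pySetD used i true)).map (fun j => PySem.List.pyGetD arr j []) := by
        rw [hlive', hdc, List.map_append, List.map_cons, ← hlenp,
          show L1.length = (L1.map (fun j => PySem.List.pyGetD arr j [])).length by simp,
          eraseIdx_decomp, ← List.map_append]
      have hlen' : (PySem.List.pySetD used i true).length = arr.length := by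
        rw [PySem.List.length_pySetD]; exact hlen
      by_cases hH : pvKeyH arr i = endv
      · -- forward: A matches on e[0]; B takes the head-index list
        have hhl : (pvPrune used (heads.getD endv [])).getLast? = some i :=
          prune_getLast_pick arr endv used pvKeyH _ i (hheads endv) hiL hH hmin hmonoH
        have hbeq : (pvKeyH arr i == endv) = true := by simpa using hH
        have hreck : (pvALoop k (chain ++ [PySem.List.pyGetD arr i []])
              (((pvLive arr used).map (fun j => PySem.List.pyGetD arr j [])).eraseIdx p)).map pvE0 =
            pvBLoop arr k (out ++ [endv]) (pvKeyT arr i) (PySem.List.pySetD used i true)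
              (heads.insert endv ((pvPrune used (heads.getD endv [])).dropLast))
              (tails.insert endv (pvPrune used (tails.getD endv []))) := by
          apply ih
          refine ⟨?_, ?_, hlen', ?_, ?_, ?_⟩
          · rw [List.map_append, hout]
            simp only [List.map_cons, List.map_nil]
            rw [show pvE0 (PySem.List.pyGetD arr i []) = endv from hH]
          · rw [PySem.List.pyGetD_neg_one_append_singleton chain _ []]; rfl
          · exact hrem'.symm ▸ hrem'
          · intro v
            by_cases hv : v = endv
            · subst hv
              rw [PySem.Dict.getD_insert_self]
              exact goodL_step_taken arr used pvKeyH v _ i hlen hb1 hb2 (hheads v) hhl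
            · rw [PySem.Dict.getD_insert_of_ne _ _ _ hv]
              exact goodL_mark arr used pvKeyH v _ i hlen hb1 hb2 (hheads v)
          · intro v
            by_cases hv : v = endv
            · subst hv
              rw [PySem.Dict.getD_insert_self]
              exact goodL_mark arr used pvKeyT v _ i hlen hb1 hb2
                (goodL_prune arr used pvKeyT v _ (htails v))
            · rw [PySem.Dict.getD_insert_of_ne _ _ _ hv]
              exact goodL_mark arr used pvKeyT v _ i hlen hb1 hb2 (htails v)
        cases htl : (pvPrune used (tails.getD endv [])).getLast? with
        | none =>
          simp only [Option.map_some, hbeq, hhl]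
          exact hreck
        | some j =>
          have hij : i ≤ j :=
            (prune_getLast_other arr endv used pvKeyT _ j i (htails endv) htl hmin hmonoT).1
          simp only [Option.map_some, hbeq, hhl]
          rw [if_pos hij]
          exact hreck
      · -- backward: A matches on e[1]; B takes the tail-index list
        have hT : pvKeyT arr i = endv := by
          rcases (by simpa [pvMatch] using hmatch : pvKeyH arr i = endv ∨ pvKeyT arr i = endv) with h | h
          · exact absurd h hH
          · exact h
        have htl : (pvPrune used (tails.getD endv [])).getLast? = some i :=
          prune_getLast_pick arr endv used pvKeyT _ i (htails endv) hiL hT hmin hmonoT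
        have hbeq : (pvKeyH arr i == endv) = false := by simpa using hH
        have hreck : (pvALoop k (chain ++ [[pvE1 (PySem.List.pyGetD arr i []), pvE0 (PySem.List.pyGetD arr i [])]])
              (((pvLive arr used).map (fun j => PySem.List.pyGetD arr j [])).eraseIdx p)).map pvE0 =
            pvBLoop arr k (out ++ [endv]) (pvKeyH arr i) (PySem.List.pySetD used i true)
              (heads.insert endv (pvPrune used (heads.getD endv [])))
              (tails.insert endv ((pvPrune used (tails.getD endv [])).dropLast)) := by
          apply ih
          refine ⟨?_, ?_, hlen', ?_, ?_, ?_⟩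
          · rw [List.map_append, hout]
            simp only [List.map_cons, List.map_nil]
            rw [show pvE0 [pvE1 (PySem.List.pyGetD arr i []), pvE0 (PySem.List.pyGetD arr i [])] =
                pvKeyT arr i from rfl, hT]
          · rw [PySem.List.pyGetD_neg_one_append_singleton chain _ []]; rfl
          · exact hrem'.symm ▸ hrem'
          · intro v
            by_cases hv : v = endv
            · subst hv
              rw [PySem.Dict.getD_insert_self]
              exact goodL_mark arr used pvKeyH v _ i hlen hb1 hb2
                (goodL_prune arr used pvKeyH v _ (hheads v))
            · rw [PySem.Dict.getD_insert_of_ne _ _ _ hv]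
              exact goodL_mark arr used pvKeyH v _ i hlen hb1 hb2 (hheads v)
          · intro v
            by_cases hv : v = endv
            · subst hv
              rw [PySem.Dict.getD_insert_self]
              exact goodL_step_taken arr used pvKeyT v _ i hlen hb1 hb2 (htails v) htl
            · rw [PySem.Dict.getD_insert_of_ne _ _ _ hv]
              exact goodL_mark arr used pvKeyT v _ i hlen hb1 hb2 (htails v)
        cases hhl : (pvPrune used (heads.getD endv [])).getLast? with
        | none =>
          simp only [Option.map_some, hbeq, htl]
          exact hreck
        | some m =>
          obtain ⟨him, hkm⟩ :=
            prune_getLast_other arr endv used pvKeyH _ m i (hheads endv) hhl hmin hmonoH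
          have hmi : ¬ (m ≤ i) := by
            have : m ≠ i := fun he => hH (he ▸ hkm)
            omega
          simp only [Option.map_some, hbeq, htl]
          rw [if_neg hmi]
          exact hreck

lemma arrange_chain_eq (arr : List (List Int)) : arrange_chain arr = arrange_chain_alt arr := by
  unfold arrange_chain arrange_chain_alt
  apply pvLoop_eq
  have hall : pvLive arr (List.replicate arr.length false) =
      PySem.List.pyRange 1 (arr.length : Int) 1 := by
    unfold pvLive
    apply List.filter_eq_self.mpr
    intro i hi
    have hb := PySem.List.mem_pyRange_one.mp hi
    simp only [pvUnused, Bool.not_eq_true']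
    rw [PySem.List.pyGetD_eq_getElem _ false (by omega) (by simpa using hb.2)]
    simp
  refine ⟨rfl, rfl, by simp, ?_, ?_, ?_⟩
  · rw [PySem.List.slice_from_one, hall,
      PySem.List.map_pyGetD_pyRange' arr [] (by norm_num)]
    norm_num [List.drop_one]
  · intro v; rw [(pvBuild_getD arr v).1]; exact goodL_of_filter_range arr _ pvKeyH v
  · intro v; rw [(pvBuild_getD arr v).2]; exact goodL_of_filter_range arr _ pvKeyT v

-- ===== VERDICT (by name: the statement is the Claim_ definition above) =====
theorem arrange_chain_spec : Claim_equal_arrange_chain := by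
  intro arr _ _
  exact arrange_chain_eq arr
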